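-- pv_equiv track=rewrite | github.com/amosbangmo/ragcraft | src/domain/multimodal_metrics.py | analyze_prompt_source_modalities
-- ===== SOURCE A (Python) =====
-- from typing import Any
--
-- def _norm_content_type(raw: object) -> str:
--     s = str(raw or "").strip().lower()
--     if s in ("text", "table", "image"):
--         return s
--     return ""
--
-- def analyze_prompt_source_modalities(prompt_sources: list[Any]) -> dict[str, Any]:
--     has_table = False
--     has_image = False
--     has_text = False
--     for ref in prompt_sources or []:
--         if not isinstance(ref, dict):
--             continue
--         ct = _norm_content_type(ref.get("content_type"))
--         if ct == "text":
--             has_text = True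
--         elif ct == "table":
--             has_table = True
--         elif ct == "image":
--             has_image = True
--     return {
--         "has_text": has_text,
--         "has_table": has_table,
--         "has_image": has_image,
--     }
-- ===== SOURCE B (Python) =====
-- def _norm_content_type(raw: object) -> str:
--     s = str(raw or "").strip().lower()
--     if s in ("text", "table", "image"):
--         return s
--     return ""
--
-- def analyze_prompt_source_modalities(prompt_sources):
--     def _has(kind):
--         return any(isinstance(ref, dict)
--                    and _norm_content_type(ref.get("content_type")) == kind
--                    for ref in prompt_sources or [])
--     return {
--         "has_text": _has("text"),
--         "has_table": _has("table"),
--         "has_image": _has("image"),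
--     }
-- ===== Notes on version B (the rewrite author's own statement) =====
-- stated objective: simpler
-- what changed: Replaces the single pass maintaining three mutable flags with three independent early-exiting any() scans, one per modality; no shared loop state remains.
import Mathlib
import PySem

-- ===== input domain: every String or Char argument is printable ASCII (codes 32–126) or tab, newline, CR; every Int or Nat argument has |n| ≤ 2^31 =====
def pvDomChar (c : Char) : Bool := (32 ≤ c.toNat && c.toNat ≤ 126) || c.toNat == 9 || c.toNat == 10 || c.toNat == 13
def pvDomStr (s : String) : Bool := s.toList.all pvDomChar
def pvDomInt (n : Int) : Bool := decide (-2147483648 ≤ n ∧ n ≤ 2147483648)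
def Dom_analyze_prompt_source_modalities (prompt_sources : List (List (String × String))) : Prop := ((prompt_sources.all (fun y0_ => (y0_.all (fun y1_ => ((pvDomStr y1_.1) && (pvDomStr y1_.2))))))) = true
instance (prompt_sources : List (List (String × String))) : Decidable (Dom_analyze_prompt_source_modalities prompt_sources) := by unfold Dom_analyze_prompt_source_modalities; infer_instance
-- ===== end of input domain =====

-- B replaces A's single pass with three mutable flags by three independent early-exiting
-- any() scans, one per modality; same cost, simpler (no shared loop state).

-- ===== PORT A =====
-- _norm_content_type: str(raw or "").strip().lower(), kept if in ("text","table","image")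
-- (raw : Option String; 'raw or ""' = raw.getD "", exact since a falsy string is exactly "")
def pvNormCT (raw : Option String) : String :=
  let s := PySem.Str.lower (PySem.Str.strip (raw.getD ""))
  if s = "text" ∨ s = "table" ∨ s = "image" then s else ""

def analyze_prompt_source_modalities (prompt_sources : List (List (String × String))) : List (String × Bool) :=
  -- state (has_table, has_image, has_text); the isinstance check is always true at this type
  let st := prompt_sources.foldl (fun st ref =>
    let ct := pvNormCT ((PySem.Dict.mk ref).get? "content_type")
    if ct = "text" then (st.1, st.2.1, true)
    else if ct = "table" then (true, st.2.1, st.2.2)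
    else if ct = "image" then (st.1, true, st.2.2)
    else st) (false, false, false)
  [("has_text", st.2.2), ("has_table", st.1), ("has_image", st.2.1)]

-- ===== PORT B =====
-- _has kind = any(... == kind); three independent scans
def pvHasB (prompt_sources : List (List (String × String))) (kind : String) : Bool :=
  prompt_sources.any (fun ref => pvNormCT ((PySem.Dict.mk ref).get? "content_type") == kind)

def analyze_prompt_source_modalities_alt (prompt_sources : List (List (String × String))) : List (String × Bool) :=
  [("has_text", pvHasB prompt_sources "text"),
   ("has_table", pvHasB prompt_sources "table"),
   ("has_image", pvHasB prompt_sources "image")]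

-- ===== PRECONDITION & SPEC =====
def Spec_analyze_prompt_source_modalities (prompt_sources : List (List (String × String))) (out : List (String × Bool)) : Prop := out = analyze_prompt_source_modalities_alt prompt_sources
instance (prompt_sources : List (List (String × String))) (out : List (String × Bool)) : Decidable (Spec_analyze_prompt_source_modalities prompt_sources out) := by unfold Spec_analyze_prompt_source_modalities; infer_instance

-- ===== CLAIM =====
def Claim_equal_analyze_prompt_source_modalities : Prop := ∀ (prompt_sources : List (List (String × String))), Dom_analyze_prompt_source_modalities prompt_sources → Spec_analyze_prompt_source_modalities prompt_sources (analyze_prompt_source_modalities prompt_sources)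

-- ===== LEMMAS AND PROOFS =====

-- A's fold sets each flag independently: final flag = initial flag OR some element normalizes to that type.
theorem pvFoldA_char (l : List (List (String × String))) (tb im tx : Bool) :
    l.foldl (fun st ref =>
      let ct := pvNormCT ((PySem.Dict.mk ref).get? "content_type")
      if ct = "text" then (st.1, st.2.1, true)
      else if ct = "table" then (true, st.2.1, st.2.2)
      else if ct = "image" then (st.1, true, st.2.2)
      else st) (tb, im, tx)
    = (tb || pvHasB l "table", im || pvHasB l "image", tx || pvHasB l "text") := by
  induction l generalizing tb im tx with
  | nil => simp [pvHasB]
  | cons r rs ih =>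
    simp only [List.foldl_cons, pvHasB, List.any_cons]
    set c := pvNormCT ((PySem.Dict.mk r).get? "content_type") with hc
    by_cases h1 : c = "text"
    · simp [h1, ih, pvHasB, Bool.or_left_comm]
    · by_cases h2 : c = "table"
      · simp [h2, ih, pvHasB, Bool.or_left_comm]
      · by_cases h3 : c = "image"
        · simp [h3, ih, pvHasB, Bool.or_left_comm]
        · have e1 : (c == "text") = false := by simp [h1]
          have e2 : (c == "table") = false := by simp [h2]
          have e3 : (c == "image") = false := by simp [h3]
          simp [h1, h2, h3, ih, pvHasB, e1, e2, e3]

-- ===== VERDICT =====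
theorem analyze_prompt_source_modalities_spec : Claim_equal_analyze_prompt_source_modalities := by
  intro ps _
  unfold Spec_analyze_prompt_source_modalities analyze_prompt_source_modalities analyze_prompt_source_modalities_alt
  simp only [pvFoldA_char, Bool.false_or]
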